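-- pv_equiv track=rewrite | github.com/ElvisRodriguez/daily_coding_problems | python/justify_text.py | fill_spaces
-- ===== SOURCE A (Python) =====
-- def fill_spaces(sentence, k):
--     if len(''.join(sentence)) == k:
--         return ''.join(sentence)
--     indices = []
--     for i in range(len(sentence)):
--         if ' ' in sentence[i]:
--             indices.append(i)
--     index = 0
--     while len(''.join(sentence)) < k:
--         sentence[indices[index]] += ' '
--         index += 1
--         index %= len(indices)
--     return ''.join(sentence)
-- ===== SOURCE B (Python) =====
-- def fill_spaces(sentence, k):
--     joined = ''.join(sentence)
--     needed = k - len(joined)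
--     if needed <= 0:
--         return joined
--     gaps = sum(1 for word in sentence if ' ' in word)
--     if gaps == 0:
--         return joined
--     q, r = divmod(needed, gaps)
--     out = []
--     g = 0
--     for word in sentence:
--         if ' ' in word:
--             out.append(word + ' ' * (q + (1 if g < r else 0)))
--             g += 1
--         else:
--             out.append(word)
--     return ''.join(out)
-- ===== Notes on version B (the rewrite author's own statement) =====
-- stated objective: faster
-- what changed: Instead of simulating the round-robin, one space at a time, with the whole sentence re-joined to measure its length on every iteration, B computes each gap token's space count in closed form via divmod(needed, gaps) and builds the result in a single pass.
import Mathlib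
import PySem

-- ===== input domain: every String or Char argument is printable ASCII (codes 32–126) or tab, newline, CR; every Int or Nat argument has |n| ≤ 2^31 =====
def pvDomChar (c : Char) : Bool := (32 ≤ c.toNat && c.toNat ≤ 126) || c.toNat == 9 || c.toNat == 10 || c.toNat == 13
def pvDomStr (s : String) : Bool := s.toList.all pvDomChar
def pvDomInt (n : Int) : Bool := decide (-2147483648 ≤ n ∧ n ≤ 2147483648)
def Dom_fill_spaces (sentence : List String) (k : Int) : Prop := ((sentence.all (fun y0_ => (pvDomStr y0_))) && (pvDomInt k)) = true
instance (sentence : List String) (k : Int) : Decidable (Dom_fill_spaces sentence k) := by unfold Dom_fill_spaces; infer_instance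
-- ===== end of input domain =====

-- B replaces A's one-space-at-a-time round-robin (re-joining the sentence each iteration) by a
-- closed-form divmod split of the needed spaces over the gap tokens in one pass; equivalence is about
-- the RETURN value only (Python A mutates `sentence` in place, B does not).

-- ===== PORT A =====
def pvJoin (s : List String) : String := PySem.Str.join "" s

def pvIdxs (s : List String) : List Nat :=
  (List.range s.length).filter (fun i => PySem.Str.isIn " " (s.getD i ""))

-- A's while-loop; the fuel only bounds the iteration count, the `<` test is Python's own.
def pvLoopA (k : Int) (indices : List Nat) : Nat → List String → Nat → List String
  | 0, s, _ => s
  | fuel+1, s, index =>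
    if PySem.Str.len (pvJoin s) < k then
      match indices[index]? with
      | none => s        -- Python raises IndexError here (indices empty); excluded by Pre_
      | some i => pvLoopA k indices fuel (s.modify i (· ++ " ")) ((index+1) % indices.length)
    else s

def fill_spaces (sentence : List String) (k : Int) : String :=
  if PySem.Str.len (pvJoin sentence) = k then pvJoin sentence
  else pvJoin (pvLoopA k (pvIdxs sentence) (k - PySem.Str.len (pvJoin sentence)).toNat sentence 0)

-- ===== PORT B =====
def pvSpaces : Nat → String          -- ' ' * n
  | 0 => ""
  | n+1 => " " ++ pvSpaces n

def fill_spaces_alt (sentence : List String) (k : Int) : String :=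
  let joined := pvJoin sentence
  let needed := k - PySem.Str.len joined
  if needed ≤ 0 then joined
  else
    let gaps : Int := sentence.countP (fun w => PySem.Str.isIn " " w)
    if gaps = 0 then joined
    else
      let q := PySem.Int.floordiv needed gaps
      let r := PySem.Int.mod needed gaps
      let out := sentence.foldl
        (fun (acc : List String × Int) w =>
          if PySem.Str.isIn " " w then
            (acc.1 ++ [w ++ pvSpaces (q + (if acc.2 < r then 1 else 0)).toNat], acc.2 + 1)
          else (acc.1 ++ [w], acc.2)) ([], 0)
      pvJoin out.1

-- ===== PRECONDITION & SPEC =====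
-- Pre_ excludes exactly the inputs on which A raises: joined length below k with no token containing a space.
def Pre_fill_spaces (sentence : List String) (k : Int) : Prop :=
  PySem.Str.len (pvJoin sentence) < k → ∃ w ∈ sentence, PySem.Str.isIn " " w = true
instance (sentence : List String) (k : Int) : Decidable (Pre_fill_spaces sentence k) := by
  unfold Pre_fill_spaces; infer_instance

def pvWitness_fill_spaces : List String × Int := (["hello ", "world"], 13)

def Spec_fill_spaces (sentence : List String) (k : Int) (out : String) : Prop := out = fill_spaces_alt sentence k
instance (sentence : List String) (k : Int) (out : String) : Decidable (Spec_fill_spaces sentence k out) := by unfold Spec_fill_spaces; infer_instance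

-- ===== CLAIM (what is proved, stated in full; the proofs are below) =====
def Claim_equal_fill_spaces : Prop := ∀ (sentence : List String) (k : Int), Dom_fill_spaces sentence k → Pre_fill_spaces sentence k → Spec_fill_spaces sentence k (fill_spaces sentence k)

-- ===== LEMMAS AND PROOFS =====

def pvP (w : String) : Bool := PySem.Str.isIn " " w

-- the common shape of both results: gap token number j (0-based, in order) gets `c j` extra spaces
def pvDist (c : Nat → Nat) : List String → Nat → List String
  | [], _ => []
  | w :: ws, g0 =>
    if pvP w then (w ++ pvSpaces (c g0)) :: pvDist c ws (g0+1) else w :: pvDist c ws g0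

-- round-robin count: how many of n steps starting at slot idx (mod g) land on slot j
def pvRR (g idx n j : Nat) : Nat := (List.range n).countP (fun t => (idx + t) % g == j)

def pvJL (s : List String) : Nat := (s.map (fun w => w.toList.length)).sum

theorem pvSpaces_snoc (n : Nat) : pvSpaces n ++ " " = pvSpaces (n+1) := by
  induction n with
  | zero => simp [pvSpaces, String.append_empty]
  | succ n ih => show (" " ++ pvSpaces n) ++ " " = " " ++ pvSpaces (n+1); rw [String.append_assoc, ih]

theorem pvDist_length (c : Nat → Nat) : ∀ (ws : List String) (g0 : Nat), (pvDist c ws g0).length = ws.length := by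
  intro ws; induction ws with
  | nil => intro g0; rfl
  | cons w ws ih => intro g0; by_cases hp : pvP w <;> simp [pvDist, hp, ih]

theorem pvDist_congr (c₁ c₂ : Nat → Nat) : ∀ (ws : List String) (g0 : Nat),
    (∀ j, g0 ≤ j → j < g0 + ws.countP pvP → c₁ j = c₂ j) → pvDist c₁ ws g0 = pvDist c₂ ws g0 := by
  intro ws; induction ws with
  | nil => intro g0 _; rfl
  | cons w ws ih =>
    intro g0 h
    by_cases hp : pvP w
    · simp only [pvDist, hp, if_pos]
      rw [h g0 le_rfl (by simp [hp]),
        ih (g0+1) (fun j h1 h2 => h j (by omega) (by simp [hp] at h2 ⊢; omega))]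
    · simp only [pvDist, hp, if_neg, Bool.false_eq_true, not_false_iff]
      rw [ih g0 (fun j h1 h2 => h j h1 (by simp [hp] at h2 ⊢; omega))]

theorem pvDist_zero : ∀ (ws : List String) (g0 : Nat), pvDist (fun _ => 0) ws g0 = ws := by
  intro ws; induction ws with
  | nil => intro g0; rfl
  | cons w ws ih => intro g0; by_cases hp : pvP w <;> simp [pvDist, hp, ih, pvSpaces, String.append_empty]

theorem pvIdxs_cons (w : String) (ws : List String) :
    pvIdxs (w :: ws) = (if pvP w then [0] else []) ++ (pvIdxs ws).map (· + 1) := by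
  unfold pvIdxs
  rw [List.length_cons, List.range_succ_eq_map, List.filter_cons, List.filter_map]
  have hcomp : ((fun i => PySem.Str.isIn " " ((w :: ws).getD i "")) ∘ Nat.succ)
      = (fun i => PySem.Str.isIn " " (ws.getD i "")) := by
    funext i; rfl
  have hmap : List.map Nat.succ ((List.range ws.length).filter
        ((fun i => PySem.Str.isIn " " ((w :: ws).getD i "")) ∘ Nat.succ))
      = ((List.range ws.length).filter (fun i => PySem.Str.isIn " " (ws.getD i ""))).map (· + 1) := by
    rw [hcomp]
  by_cases hp : pvP w
  · rw [if_pos (show PySem.Str.isIn " " ((w :: ws).getD 0 "") = true from hp), hmap, if_pos hp]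
    rfl
  · rw [if_neg (show ¬ PySem.Str.isIn " " ((w :: ws).getD 0 "") = true from hp), hmap, if_neg hp]
    rfl

theorem pvIdxs_length : ∀ ws : List String, (pvIdxs ws).length = ws.countP pvP := by
  intro ws; induction ws with
  | nil => rfl
  | cons w ws ih => rw [pvIdxs_cons, List.countP_cons]; by_cases hp : pvP w <;> simp [hp, ih]

theorem pvIdxs_lt {ws : List String} {i : Nat} (h : i ∈ pvIdxs ws) : i < ws.length := by
  unfold pvIdxs at h
  exact List.mem_range.mp (List.mem_of_mem_filter h)

theorem pvDist_addAt : ∀ (ws : List String) (c : Nat → Nat) (g0 jdx : Nat)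
    (h : jdx < (pvIdxs ws).length),
    (pvDist c ws g0).modify (pvIdxs ws)[jdx] (· ++ " ")
      = pvDist (fun j => if j = g0 + jdx then c j + 1 else c j) ws g0 := by
  intro ws
  induction ws with
  | nil => intro c g0 jdx h; simp [pvIdxs] at h
  | cons w ws ih =>
    intro c g0 jdx h
    by_cases hp : pvP w
    · have hidx : pvIdxs (w :: ws) = 0 :: (pvIdxs ws).map (· + 1) := by rw [pvIdxs_cons, if_pos hp]; rfl
      have h' : jdx < (0 :: (pvIdxs ws).map (· + 1)).length := hidx ▸ h
      rw [List.getElem_of_eq hidx h]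
      match jdx, h' with
      | 0, h' =>
        simp only [List.getElem_cons_zero, pvDist, hp, if_pos, List.modify_zero_cons]
        congr 1
        · rw [String.append_assoc, pvSpaces_snoc, if_pos (by omega : g0 = g0 + 0)]
        · apply pvDist_congr
          intro j h1 h2
          rw [if_neg (by omega)]
      | jdx+1, h' =>
        have h : jdx < (pvIdxs ws).length := by simpa using h'
        simp only [List.getElem_cons_succ, List.getElem_map]
        simp only [pvDist, hp, if_pos, List.modify_succ_cons]
        rw [if_neg (by omega), ih c (g0+1) jdx (by simpa using h)]
        simp only [show g0 + 1 + jdx = g0 + (jdx + 1) from by omega]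
    · have hidx : pvIdxs (w :: ws) = (pvIdxs ws).map (· + 1) := by rw [pvIdxs_cons, if_neg hp]; rfl
      have h' : jdx < ((pvIdxs ws).map (· + 1)).length := hidx ▸ h
      rw [List.getElem_of_eq hidx h]
      have h : jdx < (pvIdxs ws).length := by simpa using h'
      simp only [List.getElem_map]
      simp only [pvDist, hp, Bool.false_eq_true, if_neg, not_false_iff, List.modify_succ_cons]
      rw [ih c g0 jdx h]

theorem pvCharsJoin_len : ∀ css : List (List Char), (PySem.Chars.join [] css).length = (css.map List.length).sum := by
  intro css; induction css with
  | nil => simp [PySem.Chars.join_nil]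
  | cons p rest ih =>
    cases rest with
    | nil => simp [PySem.Chars.join_singleton]
    | cons q t => rw [PySem.Chars.join_cons_cons]; simp at ih ⊢; omega

theorem pvJoin_len (s : List String) : PySem.Str.len (pvJoin s) = (pvJL s : Int) := by
  rw [PySem.Str.len_eq, pvJoin, PySem.Str.toList_join]
  norm_cast
  rw [show ("" : String).toList = [] from rfl, pvCharsJoin_len]
  unfold pvJL
  rw [List.map_map]
  rfl

theorem pvJL_modify : ∀ (s : List String) (i : Nat), i < s.length →
    pvJL (s.modify i (· ++ " ")) = pvJL s + 1 := by
  intro s; induction s with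
  | nil => intro i h; simp at h
  | cons w ws ih =>
    intro i h
    match i with
    | 0 =>
      simp [pvJL, List.modify_zero_cons, String.length_append,
        show (" " : String).length = 1 from rfl]
      omega
    | i+1 =>
      simp only [List.modify_succ_cons]
      simp only [pvJL, List.map_cons, List.sum_cons] at ih ⊢
      rw [ih i (by simpa using h)]; omega

theorem pvRR_zero (g idx j : Nat) : pvRR g idx 0 j = 0 := rfl

theorem pvRR_succ (g idx n j : Nat) (hidx : idx < g) :
    pvRR g idx (n+1) j = (if j = idx then 1 else 0) + pvRR g ((idx+1) % g) n j := by
  unfold pvRR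
  rw [List.range_succ_eq_map, List.countP_cons, List.countP_map]
  have h1 : ((fun t => (idx + t) % g == j) ∘ Nat.succ) = (fun t => ((idx+1) % g + t) % g == j) := by
    funext t
    simp only [Function.comp_apply]
    congr 1
    rw [Nat.mod_add_mod]
    congr 1
    omega
  rw [h1]
  have h2 : (idx + 0) % g = idx := by rw [Nat.add_zero, Nat.mod_eq_of_lt hidx]
  rw [h2]
  simp only [beq_iff_eq]
  split_ifs <;> omega

theorem pvRR_closed (g j : Nat) (hg : 0 < g) (hj : j < g) :
    ∀ n : Nat, pvRR g 0 n j = n / g + if j < n % g then 1 else 0 := by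
  intro n; induction n with
  | zero => simp [pvRR_zero]
  | succ n ih =>
    unfold pvRR at ih ⊢
    rw [List.range_succ, List.countP_append, ih]
    have hdm := Nat.div_add_mod n g
    have hdm' := Nat.div_add_mod (n+1) g
    have hm : n % g < g := Nat.mod_lt _ hg
    have hm' : (n+1) % g < g := Nat.mod_lt _ hg
    have hmod1 : (n+1) % g = (n % g + 1) % g := (Nat.mod_add_mod n g 1).symm
    have hstep : ((n+1) % g = n % g + 1 ∧ (n+1) / g = n / g) ∨
                 (n % g = g - 1 ∧ (n+1) % g = 0 ∧ (n+1) / g = n / g + 1) := by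
      by_cases hc : n % g = g - 1
      · right
        have h0 : (n+1) % g = 0 := by
          rw [hmod1, hc, Nat.sub_add_cancel hg, Nat.mod_self]
        refine ⟨hc, h0, ?_⟩
        rw [Nat.succ_div, if_pos ((Nat.dvd_iff_mod_eq_zero).mpr h0)]
      · left
        have h1 : (n+1) % g = n % g + 1 := by
          rw [hmod1, Nat.mod_eq_of_lt (by omega)]
        refine ⟨h1, ?_⟩
        rw [Nat.succ_div, if_neg (fun hd => by
          have := (Nat.dvd_iff_mod_eq_zero).mp hd
          omega)]
        omega
    simp only [List.countP_singleton]
    have hz : (0 + n) % g = n % g := by rw [Nat.zero_add]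
    rw [hz]
    simp only [beq_iff_eq]
    rcases hstep with ⟨h1, h2⟩ | ⟨h1, h2, h3⟩
    · rw [h1, h2]
      split_ifs <;> omega
    · rw [h2, h3]
      split_ifs <;> omega

theorem pvLoopA_eq (sentence : List String) (k : Int) :
    ∀ (n : Nat) (c : Nat → Nat) (idx : Nat) (s : List String), s = pvDist c sentence 0 →
    idx < (pvIdxs sentence).length →
    PySem.Str.len (pvJoin s) + n ≤ k →
    pvLoopA k (pvIdxs sentence) n s idx
      = pvDist (fun j => c j + pvRR (pvIdxs sentence).length idx n j) sentence 0 := by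
  intro n
  induction n with
  | zero =>
    intro c idx s hs _ _
    subst hs
    rw [show (fun j => c j + pvRR (pvIdxs sentence).length idx 0 j) = c by funext j; simp [pvRR_zero]]
    rfl
  | succ n ih =>
    intro c idx s hs hidx hlen
    have hcond : PySem.Str.len (pvJoin s) < k := by push_cast at hlen; omega
    rw [pvLoopA, if_pos hcond, List.getElem?_eq_getElem hidx]
    have hmatch : (match some (pvIdxs sentence)[idx] with
        | none => s
        | some i => pvLoopA k (pvIdxs sentence) n (s.modify i (· ++ " "))
            ((idx + 1) % (pvIdxs sentence).length))
        = pvLoopA k (pvIdxs sentence) n (s.modify (pvIdxs sentence)[idx] (· ++ " "))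
            ((idx + 1) % (pvIdxs sentence).length) := rfl
    rw [hmatch]
    have hi_lt : (pvIdxs sentence)[idx] < sentence.length :=
      pvIdxs_lt (List.getElem_mem hidx)
    have hstep : s.modify (pvIdxs sentence)[idx] (· ++ " ")
        = pvDist (fun j => if j = idx then c j + 1 else c j) sentence 0 := by
      rw [hs, pvDist_addAt sentence c 0 idx hidx]
      simp only [Nat.zero_add]
    have hlen' : PySem.Str.len (pvJoin (s.modify (pvIdxs sentence)[idx] (· ++ " "))) + (n : Int) ≤ k := by
      have hmod : pvJL (s.modify (pvIdxs sentence)[idx] (· ++ " ")) = pvJL s + 1 := by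
        apply pvJL_modify
        rw [hs, pvDist_length]; exact hi_lt
      rw [pvJoin_len] at hlen ⊢
      rw [hmod]
      push_cast at hlen ⊢
      omega
    have hglen : 0 < (pvIdxs sentence).length := by omega
    rw [ih (fun j => if j = idx then c j + 1 else c j) ((idx+1) % (pvIdxs sentence).length)
        _ hstep (Nat.mod_lt _ hglen) hlen']
    congr 1
    funext j
    rw [pvRR_succ _ _ _ _ hidx]
    by_cases hj : j = idx <;> simp [hj] <;> omega

theorem pvFoldB_eq (q r : Int) :
    ∀ (ws : List String) (acc : List String) (g0 : Nat),
    ws.foldl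
      (fun (acc : List String × Int) w =>
        if PySem.Str.isIn " " w then
          (acc.1 ++ [w ++ pvSpaces (q + (if acc.2 < r then 1 else 0)).toNat], acc.2 + 1)
        else (acc.1 ++ [w], acc.2)) (acc, (g0 : Int))
    = (acc ++ pvDist (fun j => (q + (if (j : Int) < r then 1 else 0)).toNat) ws g0,
       (g0 : Int) + ws.countP pvP) := by
  intro ws
  induction ws with
  | nil => intro acc g0; simp [pvDist]
  | cons w ws ih =>
    intro acc g0
    rw [List.foldl_cons]
    by_cases hp : pvP w
    · have hp' : PySem.Str.isIn " " w = true := hp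
      simp only [hp', if_pos]
      have hcast : (g0 : Int) + 1 = ((g0 + 1 : Nat) : Int) := by push_cast; ring
      rw [hcast, ih]
      simp only [pvDist, hp, if_pos]
      rw [Prod.mk.injEq]
      constructor
      · simp
      · have hcnt : List.countP pvP (w :: ws) = List.countP pvP ws + 1 := by
          simp [hp]
        rw [hcnt]
        push_cast
        ring
    · have hp' : PySem.Str.isIn " " w = false := by simpa [pvP] using hp
      simp only [hp', Bool.false_eq_true, if_neg, not_false_iff]
      rw [ih]
      simp only [pvDist, hp, Bool.false_eq_true, if_neg, not_false_iff]
      rw [Prod.mk.injEq]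
      constructor
      · simp
      · have hcnt : List.countP pvP (w :: ws) = List.countP pvP ws := by
          simp [show pvP w = false from hp']
        rw [hcnt]

-- ===== VERDICT (by name: the statement is the Claim_ definition above) =====
theorem fill_spaces_spec : Claim_equal_fill_spaces := by
  intro sentence k _ hpre
  unfold Spec_fill_spaces fill_spaces fill_spaces_alt
  simp only []
  rw [show (fun w => PySem.Str.isIn " " w) = pvP from rfl]
  set L := PySem.Str.len (pvJoin sentence) with hL
  rcases lt_trichotomy L k with hlt | heq | hgt
  · -- padding actually happens
    obtain ⟨w, hw, hsp⟩ := hpre hlt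
    have hcnt : 0 < sentence.countP pvP := List.countP_pos_iff.mpr ⟨w, hw, hsp⟩
    have hglen : 0 < (pvIdxs sentence).length := by rw [pvIdxs_length]; exact hcnt
    set cnt := sentence.countP pvP with hc
    set nN := (k - L).toNat with hn
    have hnN : (nN : Int) = k - L := Int.toNat_of_nonneg (by omega)
    rw [if_neg (by omega)]
    rw [pvLoopA_eq sentence k nN (fun _ => 0) 0 sentence (pvDist_zero sentence 0).symm hglen (by omega)]
    rw [if_neg (by omega : ¬ (k - L ≤ 0)), if_neg (by exact_mod_cast hcnt.ne' : ¬ ((cnt : Int) = 0))]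
    have hfold := pvFoldB_eq (PySem.Int.floordiv (k - L) cnt) (PySem.Int.mod (k - L) cnt) sentence [] 0
    rw [show ((0 : Nat) : Int) = (0 : Int) by norm_num] at hfold
    rw [hfold]
    simp only [List.nil_append]
    congr 1
    apply pvDist_congr
    intro j _ hj2
    simp only [Nat.zero_add] at hj2 ⊢
    rw [pvRR_closed (pvIdxs sentence).length j hglen (by rw [pvIdxs_length]; omega) nN]
    rw [← hnN, pvIdxs_length, ← hc]
    rw [show PySem.Int.floordiv (nN : Int) (cnt : Int) = ((nN / cnt : Nat) : Int) from PySem.Int.floordiv_natCast nN cnt]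
    rw [show PySem.Int.mod (nN : Int) (cnt : Int) = ((nN % cnt : Nat) : Int) from PySem.Int.mod_natCast nN cnt]
    by_cases hcase : j < nN % cnt
    · rw [if_pos hcase, if_pos (by exact_mod_cast hcase)]
      rw [show ((nN / cnt : Nat) : Int) + 1 = ((nN / cnt + 1 : Nat) : Int) by push_cast; ring]
      rw [Int.toNat_natCast]
    · rw [if_neg hcase, if_neg (by exact_mod_cast hcase)]
      simp only [add_zero, Nat.add_zero, Int.toNat_natCast]
  · rw [if_pos heq, if_pos (by omega : k - L ≤ 0)]
  · rw [if_neg (by omega), if_pos (by omega : k - L ≤ 0)]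
    rw [show (k - L).toNat = 0 by omega]
    rfl
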